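-- pv_equiv track=rewrite | github.com/Yidhar/Embla_System | apiserver/api_server.py | _ops_max_status
-- ===== SOURCE A (Python) =====
-- from typing import Dict, List, Optional, AsyncGenerator, Any, Callable
--
-- def _ops_status_to_severity(status: str) -> str:
--     normalized = str(status or "unknown").strip().lower()
--     if normalized in {"ok", "healthy", "success"}:
--         return "ok"
--     if normalized in {"warning", "warn"}:
--         return "warning"
--     if normalized in {"critical", "error", "failed", "fail"}:
--         return "critical"
--     return "unknown"
--
-- _OPS_STATUS_RANK: Dict[str, int] = {
--     "unknown": 0,
--     "ok": 1,
--     "warning": 2,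
--     "critical": 3,
-- }
--
-- def _ops_max_status(statuses: List[str]) -> str:
--     current = "unknown"
--     current_rank = _OPS_STATUS_RANK[current]
--     for status in statuses:
--         normalized = _ops_status_to_severity(status)
--         rank = _OPS_STATUS_RANK.get(normalized, 0)
--         if rank > current_rank:
--             current = normalized
--             current_rank = rank
--     return current
-- ===== SOURCE B (Python) =====
-- def _ops_status_to_severity(status: str) -> str:
--     normalized = str(status or "unknown").strip().lower()
--     if normalized in {"ok", "healthy", "success"}:
--         return "ok"
--     if normalized in {"warning", "warn"}:
--         return "warning"
--     if normalized in {"critical", "error", "failed", "fail"}: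
--         return "critical"
--     return "unknown"
--
--
-- def _ops_max_status(statuses):
--     # check severities in descending priority with short-circuiting scans
--     if any(_ops_status_to_severity(s) == "critical" for s in statuses):
--         return "critical"
--     if any(_ops_status_to_severity(s) == "warning" for s in statuses):
--         return "warning"
--     if any(_ops_status_to_severity(s) == "ok" for s in statuses):
--         return "ok"
--     return "unknown"
-- ===== Notes on version B (the rewrite author's own statement) =====
-- stated objective: alternative
-- what changed: Replaced the single rank-tracking fold (dict lookups and a running maximum) by priority-ordered short-circuiting any-scans: check for any 'critical', then 'warning', then 'ok', else 'unknown'; no rank table is needed.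
import Mathlib
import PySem

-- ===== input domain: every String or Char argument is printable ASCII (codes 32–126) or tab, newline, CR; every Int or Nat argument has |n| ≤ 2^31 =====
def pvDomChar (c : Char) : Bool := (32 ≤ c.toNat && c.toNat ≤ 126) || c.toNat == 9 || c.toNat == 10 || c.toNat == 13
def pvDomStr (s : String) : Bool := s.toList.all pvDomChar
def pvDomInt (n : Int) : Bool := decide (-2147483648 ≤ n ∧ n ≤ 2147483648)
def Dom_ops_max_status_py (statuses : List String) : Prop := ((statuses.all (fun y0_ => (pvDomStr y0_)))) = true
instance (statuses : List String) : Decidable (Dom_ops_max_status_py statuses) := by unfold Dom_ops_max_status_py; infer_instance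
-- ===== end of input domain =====

-- B replaces A's rank-tracking fold by priority-ordered short-circuiting any-scans (alternative decomposition, same cost; return value only).

-- ===== PORT A =====
-- helper _ops_status_to_severity (shared verbatim by both Pythons)
def pvSev (status : String) : String :=
  let normalized := PySem.Str.lower (PySem.Str.strip (if status == "" then "unknown" else status))
  if normalized == "ok" || normalized == "healthy" || normalized == "success" then "ok"
  else if normalized == "warning" || normalized == "warn" then "warning"
  else if normalized == "critical" || normalized == "error" || normalized == "failed" || normalized == "fail" then "critical"
  else "unknown"

-- _OPS_STATUS_RANK
def pvRankDict : PySem.Dict String Int :=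
  ((((PySem.Dict.empty).insert "unknown" 0).insert "ok" 1).insert "warning" 2).insert "critical" 3

def ops_max_status_py (statuses : List String) : String :=
  let current := "unknown"
  -- _OPS_STATUS_RANK[current]: key "unknown" is literally present, so [] never raises
  let current_rank := (pvRankDict.get? current).getD 0
  (statuses.foldl
    (fun (st : String × Int) status =>
      let normalized := pvSev status
      let rank := pvRankDict.getD normalized 0
      if rank > st.2 then (normalized, rank) else st)
    (current, current_rank)).1

-- ===== PORT B =====
def ops_max_status_py_alt (statuses : List String) : String :=
  if statuses.any (fun s => pvSev s == "critical") then "critical"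
  else if statuses.any (fun s => pvSev s == "warning") then "warning"
  else if statuses.any (fun s => pvSev s == "ok") then "ok"
  else "unknown"

-- ===== PRECONDITION & SPEC =====
def Spec_ops_max_status_py (statuses : List String) (out : String) : Prop := out = ops_max_status_py_alt statuses
instance (statuses : List String) (out : String) : Decidable (Spec_ops_max_status_py statuses out) := by unfold Spec_ops_max_status_py; infer_instance

-- ===== CLAIM (what is proved, stated in full; the proofs are below) =====
def Claim_equal_ops_max_status_py : Prop := ∀ (statuses : List String), Dom_ops_max_status_py statuses → Spec_ops_max_status_py statuses (ops_max_status_py statuses)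

-- ===== LEMMAS AND PROOFS =====

-- rank of a severity name (what _OPS_STATUS_RANK.get(·, 0) returns)
def pvRk (n : String) : Int := pvRankDict.getD n 0

-- severity name of a rank
def pvNameOf (r : Int) : String :=
  if 3 ≤ r then "critical" else if 2 ≤ r then "warning" else if 1 ≤ r then "ok" else "unknown"

lemma pvSev_cases (s : String) :
    pvSev s = "unknown" ∨ pvSev s = "ok" ∨ pvSev s = "warning" ∨ pvSev s = "critical" := by
  unfold pvSev
  dsimp only
  repeat' split
  all_goals simp

lemma pvAlt_cases (ss : List String) :
    ops_max_status_py_alt ss = "unknown" ∨ ops_max_status_py_alt ss = "ok" ∨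
    ops_max_status_py_alt ss = "warning" ∨ ops_max_status_py_alt ss = "critical" := by
  unfold ops_max_status_py_alt
  repeat' split
  all_goals simp

lemma pvRkU : pvRk "unknown" = 0 := by decide
lemma pvRkO : pvRk "ok" = 1 := by decide
lemma pvRkW : pvRk "warning" = 2 := by decide
lemma pvRkC : pvRk "critical" = 3 := by decide

lemma pvNameOf_rk (n : String)
    (h : n = "unknown" ∨ n = "ok" ∨ n = "warning" ∨ n = "critical") :
    pvNameOf (pvRk n) = n := by
  rcases h with h | h | h | h <;> subst h <;> decide

lemma pvRk_alt_nonneg (ss : List String) : 0 ≤ pvRk (ops_max_status_py_alt ss) := by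
  rcases pvAlt_cases ss with h | h | h | h <;> rw [h] <;> decide

lemma pvRk_alt_le (ss : List String) : pvRk (ops_max_status_py_alt ss) ≤ 3 := by
  rcases pvAlt_cases ss with h | h | h | h <;> rw [h] <;> decide

-- if B's answer is "critical" then some element's severity is "critical"
lemma pvAlt_crit (ss : List String) (h : ops_max_status_py_alt ss = "critical") :
    (ss.any (fun t => pvSev t == "critical")) = true := by
  unfold ops_max_status_py_alt at h
  split_ifs at h with h1 h2 h3
  · exact h1
  · exact absurd h (by decide)
  · exact absurd h (by decide)
  · exact absurd h (by decide)

-- rank of B's result on a cons: the max of the head's severity rank and B's result on the tail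
lemma pvAlt_cons (s : String) (ss : List String) :
    pvRk (ops_max_status_py_alt (s :: ss)) =
      max (pvRk (pvSev s)) (pvRk (ops_max_status_py_alt ss)) := by
  have hle := pvRk_alt_le ss
  have hnn := pvRk_alt_nonneg ss
  rcases pvSev_cases s with hs | hs | hs | hs
  · -- "unknown": every scan ignores the head
    have h1 : ops_max_status_py_alt (s :: ss) = ops_max_status_py_alt ss := by
      simp [ops_max_status_py_alt, List.any_cons, hs]
    rw [h1, hs, pvRkU]
    exact (max_eq_right hnn).symm
  · -- "ok"
    rw [hs, pvRkO]
    by_cases hC : (ss.any (fun t => pvSev t == "critical")) = true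
    · have h1 : ops_max_status_py_alt (s :: ss) = "critical" := by
        simp [ops_max_status_py_alt, List.any_cons, hs, hC]
      have h2 : ops_max_status_py_alt ss = "critical" := by
        simp [ops_max_status_py_alt, hC]
      rw [h1, h2, pvRkC]; decide
    · by_cases hW : (ss.any (fun t => pvSev t == "warning")) = true
      · have h1 : ops_max_status_py_alt (s :: ss) = "warning" := by
          simp [ops_max_status_py_alt, List.any_cons, hs, hC, hW]
        have h2 : ops_max_status_py_alt ss = "warning" := by
          simp [ops_max_status_py_alt, hC, hW]
        rw [h1, h2, pvRkW]; decide
      · have h1 : ops_max_status_py_alt (s :: ss) = "ok" := by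
          simp [ops_max_status_py_alt, List.any_cons, hs, hC, hW]
        rw [h1, pvRkO]
        by_cases hO : (ss.any (fun t => pvSev t == "ok")) = true
        · have h2 : ops_max_status_py_alt ss = "ok" := by
            simp [ops_max_status_py_alt, hC, hW, hO]
          rw [h2, pvRkO]; decide
        · have h2 : ops_max_status_py_alt ss = "unknown" := by
            simp [ops_max_status_py_alt, hC, hW, hO]
          rw [h2, pvRkU]; decide
  · -- "warning"
    rw [hs, pvRkW]
    by_cases hC : (ss.any (fun t => pvSev t == "critical")) = true
    · have h1 : ops_max_status_py_alt (s :: ss) = "critical" := by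
        simp [ops_max_status_py_alt, List.any_cons, hs, hC]
      have h2 : ops_max_status_py_alt ss = "critical" := by
        simp [ops_max_status_py_alt, hC]
      rw [h1, h2, pvRkC]; decide
    · have h1 : ops_max_status_py_alt (s :: ss) = "warning" := by
        simp [ops_max_status_py_alt, List.any_cons, hs, hC]
      rw [h1, pvRkW]
      have h2le : pvRk (ops_max_status_py_alt ss) ≤ 2 := by
        rcases pvAlt_cases ss with h | h | h | h
        · rw [h, pvRkU]; omega
        · rw [h, pvRkO]; omega
        · rw [h, pvRkW]
        · exact absurd (pvAlt_crit ss h) hC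
      exact (max_eq_left h2le).symm
  · -- "critical"
    have h1 : ops_max_status_py_alt (s :: ss) = "critical" := by
      simp [ops_max_status_py_alt, List.any_cons, hs]
    rw [h1, hs, pvRkC]
    exact (max_eq_left hle).symm

-- A's fold from any well-formed state (cur, pvRk cur) computes the name of the running max rank
set_option maxHeartbeats 2000000 in
lemma pvFold_eq (ss : List String) : ∀ (cur : String),
    (cur = "unknown" ∨ cur = "ok" ∨ cur = "warning" ∨ cur = "critical") →
    (ss.foldl
      (fun (st : String × Int) status =>
        let normalized := pvSev status
        let rank := pvRankDict.getD normalized 0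
        if rank > st.2 then (normalized, rank) else st)
      (cur, pvRk cur)).1
    = pvNameOf (max (pvRk cur) (pvRk (ops_max_status_py_alt ss))) := by
  induction ss with
  | nil =>
    intro cur hcur
    simp only [List.foldl_nil]
    have h0 : pvRk (ops_max_status_py_alt []) = 0 := by decide
    have hnn : 0 ≤ pvRk cur := by
      rcases hcur with h | h | h | h <;> rw [h] <;> decide
    rw [h0, max_eq_left hnn, pvNameOf_rk cur hcur]
  | cons s ss ih =>
    intro cur hcur
    simp only [List.foldl_cons]
    rw [pvAlt_cons]
    have e : pvRankDict.getD (pvSev s) 0 = pvRk (pvSev s) := rfl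
    rw [e]
    by_cases h : pvRk cur < pvRk (pvSev s)
    · rw [if_pos h]
      exact (ih (pvSev s) (pvSev_cases s)).trans
        (congrArg pvNameOf (max_eq_right (le_max_of_le_left h.le)).symm)
    · rw [if_neg h]
      refine (ih cur hcur).trans (congrArg pvNameOf ?_)
      rw [← max_assoc, max_eq_left (le_of_not_gt h)]

-- ===== VERDICT (by name: the statement is the Claim_ definition above) =====
theorem ops_max_status_py_spec : Claim_equal_ops_max_status_py := by
  intro statuses _
  unfold Spec_ops_max_status_py ops_max_status_py
  have hstart : ((pvRankDict.get? "unknown").getD 0) = pvRk "unknown" := by decide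
  simp only [hstart]
  rw [pvFold_eq statuses "unknown" (Or.inl rfl), pvRkU,
    max_eq_right (pvRk_alt_nonneg statuses), pvNameOf_rk _ (pvAlt_cases statuses)]
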